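-- pv_equiv track=rewrite | github.com/onurefe/SymmetryLens | operation_region_experiment_runner.py | find_gpu_index
-- ===== SOURCE A (Python) =====
-- NUM_PROCESS_PER_GPUS = [1, 1, 1, 1]
--
-- def find_gpu_index(process_index):
--     gpu_index = -1
--     for i in range(4):
--         if sum(NUM_PROCESS_PER_GPUS[0 : i + 1]) > process_index:
--             gpu_index = i
--             break
--
--     if gpu_index != -1:
--         return gpu_index
--     else:
--         raise RuntimeError("GPU process capacity have been exceeded.")
-- ===== SOURCE B (Python) =====
-- from itertools import accumulate
-- from bisect import bisect_right
--
-- NUM_PROCESS_PER_GPUS = [1, 1, 1, 1]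
--
-- def find_gpu_index(process_index):
--     cumulative = list(accumulate(NUM_PROCESS_PER_GPUS))
--     gpu_index = bisect_right(cumulative, process_index)
--     if gpu_index < len(cumulative):
--         return gpu_index
--     raise RuntimeError("GPU process capacity have been exceeded.")
-- ===== Notes on version B (the rewrite author's own statement) =====
-- stated objective: idiomatic
-- what changed: Replaced the first-match loop that re-sums a growing prefix on every iteration with a precomputed cumulative-capacity table (itertools.accumulate) and a bisect_right binary-search lookup.
import Mathlib
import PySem

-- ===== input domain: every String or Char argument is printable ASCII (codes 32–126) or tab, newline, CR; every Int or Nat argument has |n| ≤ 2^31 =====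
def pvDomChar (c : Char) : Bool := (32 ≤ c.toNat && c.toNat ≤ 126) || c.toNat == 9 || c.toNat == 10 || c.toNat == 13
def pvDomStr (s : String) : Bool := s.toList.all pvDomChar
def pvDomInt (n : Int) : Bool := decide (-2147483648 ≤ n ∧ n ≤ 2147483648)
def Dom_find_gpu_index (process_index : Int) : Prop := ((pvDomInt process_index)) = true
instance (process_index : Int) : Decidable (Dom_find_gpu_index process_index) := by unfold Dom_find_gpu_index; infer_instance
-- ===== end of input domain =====

-- B swaps A's first-match loop (which re-sums a growing prefix each iteration) for a
-- cumulative-capacity table plus a bisect_right lookup (idiomatic; same behaviour).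

-- ===== PORT A =====
def NUM_PROCESS_PER_GPUS : List Int := [1, 1, 1, 1]

-- the 'for i in range(4)' loop with break: first i whose prefix sum exceeds process_index, else -1
def pvA_loop (process_index : Int) : List Int → Int
  | [] => -1
  | i :: rest =>
    if (PySem.List.slice NUM_PROCESS_PER_GPUS (some 0) (some (i + 1))).sum > process_index then i
    else pvA_loop process_index rest

def find_gpu_index (process_index : Int) : Int :=
  let gpu_index := pvA_loop process_index (PySem.List.pyRange 0 4 1)
  if gpu_index ≠ -1 then gpu_index
  else 0  -- Python raises RuntimeError here; excluded by Pre_find_gpu_index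

-- ===== PORT B =====
def find_gpu_index_alt (process_index : Int) : Int :=
  -- cumulative = list(accumulate(NUM_PROCESS_PER_GPUS))
  let cumulative := (NUM_PROCESS_PER_GPUS.scanl (· + ·) 0).tail
  -- gpu_index = bisect_right(cumulative, process_index): insertion point in a sorted list
  let gpu_index : Int := (cumulative.countP (fun c => decide (c ≤ process_index)) : Nat)
  if gpu_index < (cumulative.length : Int) then gpu_index
  else 0  -- Python raises RuntimeError here; excluded by Pre_find_gpu_index

-- ===== PRECONDITION & SPEC =====
-- A raises RuntimeError when process_index reaches the total GPU capacity; Pre_ excludes exactly those inputs (B raises there too).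
def Pre_find_gpu_index (process_index : Int) : Prop := process_index < 4
instance (process_index : Int) : Decidable (Pre_find_gpu_index process_index) := by unfold Pre_find_gpu_index; infer_instance
def pvWitness_find_gpu_index : Int := (2)

def Spec_find_gpu_index (process_index : Int) (out : Int) : Prop := out = find_gpu_index_alt process_index
instance (process_index : Int) (out : Int) : Decidable (Spec_find_gpu_index process_index out) := by unfold Spec_find_gpu_index; infer_instance

-- ===== CLAIM (what is proved, stated in full; the proofs are below) =====
def Claim_equal_find_gpu_index : Prop := ∀ (process_index : Int), Dom_find_gpu_index process_index → Pre_find_gpu_index process_index → Spec_find_gpu_index process_index (find_gpu_index process_index)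

-- ===== LEMMAS AND PROOFS =====
theorem pvA_eval (p : Int) (hp : p < 4) :
    find_gpu_index p = if p < 1 then 0 else if p < 2 then 1 else if p < 3 then 2 else 3 := by
  have hr : PySem.List.pyRange 0 4 1 = [0, 1, 2, 3] := by decide
  have h2 : (List.take (Int.toNat 2) ([1, 1, 1, 1] : List Int)).sum = 2 := by decide
  have h3 : (List.take (Int.toNat 3) ([1, 1, 1, 1] : List Int)).sum = 3 := by decide
  have h4 : (List.take (Int.toNat 4) ([1, 1, 1, 1] : List Int)).sum = 4 := by decide
  simp only [find_gpu_index, hr, pvA_loop]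
  norm_num [PySem.List.slice, NUM_PROCESS_PER_GPUS, h2, h3, h4]
  split_ifs <;> simp_all <;> omega

theorem pvB_eval (p : Int) (hp : p < 4) :
    find_gpu_index_alt p = if p < 1 then 0 else if p < 2 then 1 else if p < 3 then 2 else 3 := by
  simp only [find_gpu_index_alt, NUM_PROCESS_PER_GPUS]
  norm_num [List.scanl, List.countP, List.countP.go, Bool.cond_decide]
  split_ifs <;> simp_all <;> omega

-- ===== VERDICT (by name: the statement is the Claim_ definition above) =====
theorem find_gpu_index_spec : Claim_equal_find_gpu_index := by
  intro p _ hp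
  unfold Spec_find_gpu_index
  rw [pvA_eval p hp, pvB_eval p hp]
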